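-- pv_equiv track=rewrite | github.com/naphattar/Comp_prog_2021-1 | Grader/match.py | get_secret
-- ===== SOURCE A (Python) =====
-- def get_secret(t):
--     keyword = t[0]
--     sentence = t[1:]
--     result = ""
--     sentence = sentence.split(keyword)
--     newword = [sentence[i] for i in range(len(sentence)) if i%2==1]
--     for i in newword:
--         result += i
--     return result
-- ===== SOURCE B (Python) =====
-- def get_secret(t):
--     keyword = t[0]
--     cnt = 0
--     out = []
--     for ch in t[1:]:
--         if ch == keyword:
--             cnt += 1
--         elif cnt % 2 == 1:
--             out.append(ch)
--     return "".join(out)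
-- ===== Notes on version B (the rewrite author's own statement) =====
-- stated objective: alternative
-- what changed: Drops the split-then-select-odd-pieces pipeline: B streams once over t[1:] keeping a separator-parity counter and collects a character exactly when an odd number of keyword chars precede it.
import Mathlib
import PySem

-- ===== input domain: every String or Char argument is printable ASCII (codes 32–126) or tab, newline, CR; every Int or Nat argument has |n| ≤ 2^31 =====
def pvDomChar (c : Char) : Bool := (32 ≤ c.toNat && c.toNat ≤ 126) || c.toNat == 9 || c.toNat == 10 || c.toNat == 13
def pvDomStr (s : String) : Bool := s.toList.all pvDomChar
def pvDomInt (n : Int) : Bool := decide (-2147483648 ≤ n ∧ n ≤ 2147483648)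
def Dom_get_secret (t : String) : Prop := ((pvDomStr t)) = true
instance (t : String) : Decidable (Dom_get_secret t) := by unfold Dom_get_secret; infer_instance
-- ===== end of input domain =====

-- B replaces the split-into-pieces + odd-index-selection pipeline by one streaming pass
-- with a separator-parity counter (alternative decomposition, same asymptotic cost).


-- ===== PORT A =====
def get_secret (t : String) : String :=
  match PySem.List.pyGet? t.toList 0 with            -- keyword = t[0]
  | none => ""                                        -- t = "": Python raises IndexError (excluded by Pre_)
  | some keyword =>
    let sentence := PySem.List.slice t.toList (some 1) none          -- t[1:]
    let pieces := PySem.Chars.splitOn sentence [keyword]             -- sentence.split(keyword)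
    let newword := ((PySem.List.pyRange 0 (pieces.length : Int) 1).filter
        (fun i => PySem.Int.mod i 2 == 1)).map
        (fun i => PySem.List.pyGetD pieces i [])                     -- [sentence[i] for i in range(..) if i%2==1]
    String.mk (newword.foldl (· ++ ·) [])                            -- for i in newword: result += i

-- ===== PORT B =====
def get_secret_alt (t : String) : String :=
  match t.toList with
  | [] => ""                                          -- t = "": Python raises IndexError (excluded by Pre_)
  | kw :: rest =>
    String.mk (rest.foldl (fun (st : Nat × List Char) ch =>
      if ch == kw then (st.1 + 1, st.2)
      else if st.1 % 2 == 1 then (st.1, st.2 ++ [ch]) else st) (0, ([] : List Char))).2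

-- ===== PRECONDITION & SPEC =====
-- Pre_ excludes only the empty string, on which A (and B) raise IndexError at t[0].
def Pre_get_secret (t : String) : Prop := t ≠ ""
instance (t : String) : Decidable (Pre_get_secret t) := by unfold Pre_get_secret; infer_instance
def pvWitness_get_secret : String := "XaXbXc"
def Spec_get_secret (t : String) (out : String) : Prop := out = get_secret_alt t
instance (t : String) (out : String) : Decidable (Spec_get_secret t out) := by unfold Spec_get_secret; infer_instance

-- ===== CLAIM (what is proved, stated in full; the proofs are below) =====
def Claim_equal_get_secret : Prop := ∀ (t : String), Dom_get_secret t → Pre_get_secret t → Spec_get_secret t (get_secret t)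

-- ===== LEMMAS AND PROOFS =====

-- structural split by a single character (spec for PySem.Chars.splitOn cs [k])
def splitC (k : Char) : List Char → List (List Char)
  | [] => [[]]
  | c :: cs =>
    if c = k then [] :: splitC k cs
    else match splitC k cs with
      | [] => [[c]]          -- unreachable: splitC never returns []
      | h :: t => (c :: h) :: t

-- piece lists at odd / even positions
mutual
def oddsL : List (List Char) → List (List Char)
  | [] => []
  | _ :: r => evensL r
def evensL : List (List Char) → List (List Char)
  | [] => []
  | a :: r => a :: oddsL r
end

def consHead (p : List Char) : List (List Char) → List (List Char)
  | [] => [p]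
  | h :: t => (p ++ h) :: t

theorem splitC_ne_nil (k : Char) (cs : List Char) : splitC k cs ≠ [] := by
  cases cs with
  | nil => simp [splitC]
  | cons c cs =>
    simp only [splitC]
    split_ifs
    · simp
    · cases h : splitC k cs <;> simp

theorem go_spec (k : Char) (l : List Char) : ∀ (fuel : Nat) (cur : List Char)
    (acc : List (List Char)) (_ : l.length ≤ fuel),
    PySem.Chars.splitOn.go [k] fuel l cur acc
      = acc.reverse ++ consHead cur.reverse (splitC k l) := by
  induction l with
  | nil =>
    intro fuel cur acc _
    cases fuel <;> simp [PySem.Chars.splitOn.go, splitC, consHead]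
  | cons c rest ih =>
    intro fuel cur acc hle
    cases fuel with
    | zero => simp at hle
    | succ f =>
      simp only [PySem.Chars.splitOn.go]
      by_cases hc : c = k
      · have hpre : List.isPrefixOf [k] (c :: rest) = true := by
          simp [List.isPrefixOf, hc]
        rw [if_pos hpre]
        have := ih f [] (cur.reverse :: acc) (by simp at hle; omega)
        simp only [List.length_singleton, List.drop_one, List.tail_cons] at this ⊢
        rw [this]
        have hne := splitC_ne_nil k rest
        cases hs : splitC k rest with
        | nil => exact absurd hs hne
        | cons h t => simp [splitC, hc, hs, consHead]
      · have hpre : List.isPrefixOf [k] (c :: rest) = false := by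
          simp [List.isPrefixOf]; exact fun h => absurd h.symm hc
        rw [if_neg (by simp [hpre])]
        have := ih f (c :: cur) acc (by simp at hle ⊢; omega)
        rw [this]
        have hne := splitC_ne_nil k rest
        cases hs : splitC k rest with
        | nil => exact absurd hs hne
        | cons h t => simp [splitC, hc, hs, consHead]

theorem splitOn_eq_splitC (k : Char) (cs : List Char) :
    PySem.Chars.splitOn cs [k] = splitC k cs := by
  have := go_spec k cs (cs.length + 1) [] [] (by omega)
  have hne := splitC_ne_nil k cs
  cases hs : splitC k cs with
  | nil => exact absurd hs hne
  | cons h t => simpa [PySem.Chars.splitOn, consHead, hs] using this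

-- A's index comprehension picks exactly the pieces at odd positions
theorem range_sel (l : List (List Char)) :
    (((List.range l.length).filter (fun n => n % 2 == 1)).map (fun n => l.getD n []) = oddsL l)
    ∧ (((List.range l.length).filter (fun n => n % 2 == 0)).map (fun n => l.getD n []) = evensL l) := by
  induction l with
  | nil => simp [oddsL, evensL]
  | cons a r ih =>
    have e1 : ((fun n : Nat => n % 2 == 1) ∘ Nat.succ) = (fun n : Nat => n % 2 == 0) := by
      funext n; simp [Nat.succ_eq_add_one, Nat.add_mod]; omega
    have e0 : ((fun n : Nat => n % 2 == 0) ∘ Nat.succ) = (fun n : Nat => n % 2 == 1) := by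
      funext n; simp [Nat.succ_eq_add_one, Nat.add_mod]; omega
    constructor
    · simp only [List.length_cons, List.range_succ_eq_map, List.filter_cons, List.filter_map, e1, oddsL]
      norm_num
      simp only [Function.comp_def, List.getElem?_cons_succ]
      simpa [List.getD] using ih.2
    · simp only [List.length_cons, List.range_succ_eq_map, List.filter_cons, List.filter_map, e0, evensL]
      norm_num
      simp only [Function.comp_def, List.getElem?_cons_succ]
      simpa [List.getD] using ih.1

-- B's fold invariant: the parity counter selects the even/odd pieces of the split
theorem fold_inv (k : Char) (cs : List Char) : ∀ (cnt : Nat) (acc : List Char),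
    (cs.foldl (fun (st : Nat × List Char) ch =>
      if ch == k then (st.1 + 1, st.2)
      else if st.1 % 2 == 1 then (st.1, st.2 ++ [ch]) else st) (cnt, acc)).2
    = acc ++ (if cnt % 2 = 1 then (evensL (splitC k cs)).flatten
              else (oddsL (splitC k cs)).flatten) := by
  induction cs with
  | nil => intro cnt acc; simp [splitC, oddsL, evensL]
  | cons c cs ih =>
    intro cnt acc
    simp only [List.foldl_cons]
    by_cases hc : c = k
    · simp only [hc, beq_self_eq_true, if_true, ih]
      have h2 : (cnt + 1) % 2 = 1 ↔ ¬ (cnt % 2 = 1) := by omega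
      by_cases hp : cnt % 2 = 1
      · simp [splitC, hp, h2, evensL]
      · simp [splitC, hp, h2, oddsL]
    · have hb : (c == k) = false := by simp [hc]
      have hne := splitC_ne_nil k cs
      cases hs : splitC k cs with
      | nil => exact absurd hs hne
      | cons h t =>
        by_cases hp : cnt % 2 = 1
        · simp only [hb, hp, if_true, ih, hs]
          simp [splitC, hc, hs, hp, evensL]
        · simp only [hb, if_false, hp, if_false, ih, hs]
          simp [splitC, hc, hs, hp, oddsL]

theorem foldl_append_flatten (l : List (List Char)) (init : List Char) :
    l.foldl (· ++ ·) init = init ++ l.flatten := by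
  induction l generalizing init with
  | nil => simp
  | cons a r ih => simp [ih, List.append_assoc]

-- ===== VERDICT (by name: the statement is the Claim_ definition above) =====
theorem get_secret_spec : Claim_equal_get_secret := by
  intro t _ hpre
  unfold Spec_get_secret get_secret get_secret_alt
  cases ht : t.toList with
  | nil =>
    exact absurd (String.toList_eq_nil_iff.mp ht) hpre
  | cons kw rest =>
    have hget : PySem.List.pyGet? (kw :: rest) 0 = some kw := by
      simp [PySem.List.pyGet?, PySem.List.pyIdx?]
    rw [hget]
    simp only [PySem.List.slice_from_one, List.tail_cons]
    rw [splitOn_eq_splitC]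
    have hsel : ((PySem.List.pyRange 0 ((splitC kw rest).length : Int) 1).filter
        (fun i => PySem.Int.mod i 2 == 1)).map (fun i => PySem.List.pyGetD (splitC kw rest) i [])
        = oddsL (splitC kw rest) := by
      rw [PySem.List.pyRange_one]
      simp only [List.filter_map, List.map_map, Int.sub_zero, Int.toNat_natCast]
      rw [show (List.range (splitC kw rest).length).filter
            ((fun i => PySem.Int.mod i 2 == 1) ∘ (fun n : Nat => (0 : Int) + n))
          = (List.range (splitC kw rest).length).filter (fun n => n % 2 == 1) from by
        apply List.filter_congr; intro x _
        simp; omega]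
      rw [show ((fun i => PySem.List.pyGetD (splitC kw rest) i []) ∘ fun k : Nat => (0 : Int) + ↑k)
          = fun n : Nat => (splitC kw rest).getD n [] from by
        funext n; simp [PySem.List.pyGetD_natCast]]
      exact (range_sel (splitC kw rest)).1
    rw [hsel, foldl_append_flatten]
    rw [fold_inv kw rest 0 []]
    simp
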